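-- pv_equiv track=rewrite | github.com/martinece0/knu_project | main.py | correct_plate_text
-- ===== SOURCE A (Python) =====
-- def correct_plate_text(text):
--     """
--     Corrects common OCR errors in license plate text.
--
--     Args:
--         text (str): Raw OCR-detected text.
--
--     Returns:
--         str: Corrected and formatted license plate text.
--     """
--     corrected_text = ""
--     for i, char in enumerate(text):
--         if 2 <= i <= 4:
--             char = {'G': '6', 'I': '1', 'B': '8'}.get(char, char)
--         else:
--             char = {'0': 'O', 'O': 'D', '6': 'G', '8': 'B'}.get(char, char)
--         corrected_text += char
--
--     corrected_text = add_missing_hyphens(corrected_text)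
--     return corrected_text
--
-- def add_missing_hyphens(text):
--     """
--     Adds hyphens to the license plate text based on its length.
--
--     Args:
--         text (str): Text without hyphens.
--
--     Returns:
--         str: Formatted text with hyphens.
--     """
--     if len(text) == 8 and text[2].isdigit():
--         return text[:2] + '-' + text[2:5] + '-' + text[5:]
--     elif len(text) == 7 and text[1].isdigit():
--         return text[:1] + '-' + text[1:4] + '-' + text[4:]
--     return text
-- ===== SOURCE B (Python) =====
-- _MID = str.maketrans({'G': '6', 'I': '1', 'B': '8'})
-- _OUTER = str.maketrans({'0': 'O', 'O': 'D', '6': 'G', '8': 'B'})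
--
--
-- def correct_plate_text(text):
--     """
--     Corrects common OCR errors in license plate text.
--
--     Args:
--         text (str): Raw OCR-detected text.
--
--     Returns:
--         str: Corrected and formatted license plate text.
--     """
--     fixed = (text[:2].translate(_OUTER)
--              + text[2:5].translate(_MID)
--              + text[5:].translate(_OUTER))
--     if len(fixed) == 8 and fixed[2].isdigit():
--         return f"{fixed[:2]}-{fixed[2:5]}-{fixed[5:]}"
--     if len(fixed) == 7 and fixed[1].isdigit():
--         return f"{fixed[:1]}-{fixed[1:4]}-{fixed[4:]}"
--     return fixed
-- ===== Notes on version B (the rewrite author's own statement) =====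
-- stated objective: idiomatic
-- what changed: Replaces the per-character enumerate loop with index-range branching by slicing the text into three segments ([:2], [2:5], [5:]) translated segment-wise via str.maketrans/str.translate, with the hyphen logic inlined.
import Mathlib
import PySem

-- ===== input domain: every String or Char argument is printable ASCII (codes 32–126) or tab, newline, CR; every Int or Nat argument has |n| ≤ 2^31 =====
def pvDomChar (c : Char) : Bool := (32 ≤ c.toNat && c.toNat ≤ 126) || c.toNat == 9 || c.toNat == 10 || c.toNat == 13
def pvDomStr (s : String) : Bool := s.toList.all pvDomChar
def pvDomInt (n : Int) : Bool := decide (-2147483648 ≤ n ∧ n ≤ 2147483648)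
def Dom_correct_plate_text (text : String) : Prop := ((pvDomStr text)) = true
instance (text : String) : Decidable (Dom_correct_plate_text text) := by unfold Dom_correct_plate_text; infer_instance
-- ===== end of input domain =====

-- B replaces A's per-index character loop by three slice-then-translate segments (more idiomatic); return values proved equal on all inputs.

-- ===== PORT A =====
-- {'G': '6', 'I': '1', 'B': '8'} used inside positions 2..4
def cptA_midTbl : PySem.Dict Char Char := PySem.Dict.ofList [('G', '6'), ('I', '1'), ('B', '8')]
-- {'0': 'O', 'O': 'D', '6': 'G', '8': 'B'} used at the other positions
def cptA_outTbl : PySem.Dict Char Char := PySem.Dict.ofList [('0', 'O'), ('O', 'D'), ('6', 'G'), ('8', 'B')]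

-- the body of A's 'for i, char in enumerate(text)' loop: one corrected character
def cptA_corr (i : Nat) (c : Char) : Char :=
  if 2 ≤ i ∧ i ≤ 4 then PySem.Dict.getD cptA_midTbl c c else PySem.Dict.getD cptA_outTbl c c

-- the loop itself: accumulates corrected_text += char with the running index
def cptA_go : Nat → List Char → List Char → List Char
  | _, acc, [] => acc
  | i, acc, c :: cs => cptA_go (i + 1) (acc ++ [cptA_corr i c]) cs

-- add_missing_hyphens; text[2]/text[1] are in range whenever the length guard holds,
-- and single-char .isdigit() is PySem.Chars.isdigit (exact on ASCII)
def add_missing_hyphens (cs : List Char) : List Char :=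
  if cs.length = 8 ∧ PySem.Chars.isdigit (PySem.List.pyGetD cs 2 ' ') = true then
    PySem.List.slice cs none (some 2) ++ '-' :: (PySem.List.slice cs (some 2) (some 5) ++ '-' :: PySem.List.slice cs (some 5) none)
  else if cs.length = 7 ∧ PySem.Chars.isdigit (PySem.List.pyGetD cs 1 ' ') = true then
    PySem.List.slice cs none (some 1) ++ '-' :: (PySem.List.slice cs (some 1) (some 4) ++ '-' :: PySem.List.slice cs (some 4) none)
  else cs

def correct_plate_text (text : String) : String :=
  String.ofList (add_missing_hyphens (cptA_go 0 [] text.toList))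

-- ===== PORT B =====
def cptB_MID : PySem.Dict Char Char := PySem.Dict.ofList [('G', '6'), ('I', '1'), ('B', '8')]
def cptB_OUTER : PySem.Dict Char Char := PySem.Dict.ofList [('0', 'O'), ('O', 'D'), ('6', 'G'), ('8', 'B')]

-- s.translate(tbl): each character through the table, identity where absent
def cptB_translate (tbl : PySem.Dict Char Char) (cs : List Char) : List Char :=
  cs.map (fun c => PySem.Dict.getD tbl c c)

def correct_plate_text_alt (text : String) : String :=
  let cs := text.toList
  let fixed := cptB_translate cptB_OUTER (PySem.List.slice cs none (some 2))
            ++ cptB_translate cptB_MID (PySem.List.slice cs (some 2) (some 5))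
            ++ cptB_translate cptB_OUTER (PySem.List.slice cs (some 5) none)
  if fixed.length = 8 ∧ PySem.Chars.isdigit (PySem.List.pyGetD fixed 2 ' ') = true then
    String.ofList (PySem.List.slice fixed none (some 2) ++ '-' :: (PySem.List.slice fixed (some 2) (some 5) ++ '-' :: PySem.List.slice fixed (some 5) none))
  else if fixed.length = 7 ∧ PySem.Chars.isdigit (PySem.List.pyGetD fixed 1 ' ') = true then
    String.ofList (PySem.List.slice fixed none (some 1) ++ '-' :: (PySem.List.slice fixed (some 1) (some 4) ++ '-' :: PySem.List.slice fixed (some 4) none))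
  else String.ofList fixed

-- ===== PRECONDITION & SPEC =====
def Spec_correct_plate_text (text : String) (out : String) : Prop := out = correct_plate_text_alt text
instance (text : String) (out : String) : Decidable (Spec_correct_plate_text text out) := by unfold Spec_correct_plate_text; infer_instance

-- ===== CLAIM (what is proved, stated in full; the proofs are below) =====
def Claim_equal_correct_plate_text : Prop := ∀ (text : String), Dom_correct_plate_text text → Spec_correct_plate_text text (correct_plate_text text)

-- ===== LEMMAS AND PROOFS =====

-- the list of corrected characters A's loop produces, starting at index i
def cptA_list : Nat → List Char → List Char
  | _, [] => []
  | i, c :: cs => cptA_corr i c :: cptA_list (i + 1) cs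

theorem cptA_go_eq (cs : List Char) : ∀ (i : Nat) (acc : List Char),
    cptA_go i acc cs = acc ++ cptA_list i cs := by
  induction cs with
  | nil => intro i acc; simp [cptA_go, cptA_list]
  | cons c cs ih => intro i acc; simp [cptA_go, cptA_list, ih]

theorem cptA_list_ge5 (cs : List Char) : ∀ (i : Nat), 5 ≤ i →
    cptA_list i cs = cs.map (fun c => PySem.Dict.getD cptA_outTbl c c) := by
  induction cs with
  | nil => intro i _; simp [cptA_list]
  | cons c cs ih =>
      intro i hi
      have : ¬ (2 ≤ i ∧ i ≤ 4) := by omega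
      simp [cptA_list, cptA_corr, this, ih (i + 1) (by omega)]

theorem tables_eq_mid : cptA_midTbl = cptB_MID := rfl
theorem tables_eq_out : cptA_outTbl = cptB_OUTER := rfl

theorem cptA_list_zero (cs : List Char) :
    cptA_list 0 cs =
      cptB_translate cptB_OUTER (cs.take 2)
        ++ cptB_translate cptB_MID ((cs.drop 2).take 3)
        ++ cptB_translate cptB_OUTER (cs.drop 5) := by
  match cs with
  | [] => simp [cptA_list, cptB_translate]
  | [a] => simp [cptA_list, cptA_corr, cptB_translate, tables_eq_out]
  | [a, b] => simp [cptA_list, cptA_corr, cptB_translate, tables_eq_out]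
  | [a, b, c] => simp [cptA_list, cptA_corr, cptB_translate, tables_eq_mid, tables_eq_out]
  | [a, b, c, d] => simp [cptA_list, cptA_corr, cptB_translate, tables_eq_mid, tables_eq_out]
  | a :: b :: c :: d :: e :: rest =>
      simp [cptA_list, cptA_corr, cptB_translate,
        cptA_list_ge5 rest 5 (by omega), List.take_succ_cons, List.drop_succ_cons,
        tables_eq_mid, tables_eq_out]

theorem fixed_eq (cs : List Char) :
    cptA_go 0 [] cs =
      cptB_translate cptB_OUTER (PySem.List.slice cs none (some 2))
        ++ cptB_translate cptB_MID (PySem.List.slice cs (some 2) (some 5))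
        ++ cptB_translate cptB_OUTER (PySem.List.slice cs (some 5) none) := by
  rw [cptA_go_eq, List.nil_append, cptA_list_zero,
    PySem.List.slice_to cs (by norm_num : (0:Int) ≤ 2),
    PySem.List.slice_toNat cs (by norm_num : (0:Int) ≤ 2) (by norm_num : (0:Int) ≤ 5),
    PySem.List.slice_from cs (by norm_num : (0:Int) ≤ 5)]
  rfl

-- ===== VERDICT (by name: the statement is the Claim_ definition above) =====
theorem correct_plate_text_spec : Claim_equal_correct_plate_text := by
  intro text _
  unfold Spec_correct_plate_text correct_plate_text correct_plate_text_alt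
  rw [fixed_eq text.toList]
  simp only [add_missing_hyphens]
  split_ifs <;> rfl
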